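-- pv_equiv track=rewrite | github.com/sde1000/aoc2020 | day17.py | neighbour_coords
-- ===== SOURCE A (Python) =====
-- def neighbour_coords(coords):
--     x, *xs = coords
--     if xs:
--         for j in (-1, 0, 1):
--             yield from ((x + j,) + k for k in neighbour_coords(xs))
--     else:
--         for j in (-1, 0, 1):
--             yield (x + j,)
-- ===== SOURCE B (Python) =====
-- def neighbour_coords(coords):
--     # iterative left-fold: build the full cartesian product of per-dimension
--     # offsets as a list, extending each partial tuple by one dimension per pass
--     results = [()]
--     for c in coords:
--         results = [r + (c + d,) for r in results for d in (-1, 0, 1)]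
--     yield from results
-- ===== Notes on version B (the rewrite author's own statement) =====
-- stated objective: alternative
-- what changed: Replaces the per-dimension recursion (with yield-from over recursive generators) by a flat iterative left-fold that extends each partial tuple by one coordinate per pass, same enumeration order.
import Mathlib
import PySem

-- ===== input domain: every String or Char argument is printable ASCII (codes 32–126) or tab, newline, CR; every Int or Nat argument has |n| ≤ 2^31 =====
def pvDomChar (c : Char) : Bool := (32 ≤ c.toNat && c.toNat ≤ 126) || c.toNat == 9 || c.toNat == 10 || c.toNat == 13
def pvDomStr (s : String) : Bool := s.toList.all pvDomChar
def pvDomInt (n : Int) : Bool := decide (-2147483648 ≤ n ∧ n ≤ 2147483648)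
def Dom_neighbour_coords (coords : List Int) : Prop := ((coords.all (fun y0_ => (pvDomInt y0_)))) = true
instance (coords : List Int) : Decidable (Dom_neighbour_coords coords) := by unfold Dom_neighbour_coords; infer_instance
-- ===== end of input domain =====

-- B iterates the list of coordinates with a left fold, extending each partial
-- result by one coordinate per pass, instead of A's per-dimension recursion.
-- Equivalence is about the list of yielded tuples (both Pythons are generators).

-- ===== PORT A =====
-- A: x, *xs = coords; if xs nonempty, for j in (-1,0,1) yield (x+j,)+k for k in rec(xs);
-- else for j in (-1,0,1) yield (x+j,).  On [] A raises ValueError (excluded by Pre_).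
def neighbour_coords (coords : List Int) : List (List Int) :=
  match coords with
  | [] => []  -- unreachable under Pre_: Python raises ValueError here
  | x :: xs =>
    if xs.isEmpty then
      ([-1, 0, 1] : List Int).map (fun j => [x + j])
    else
      ([-1, 0, 1] : List Int).flatMap (fun j => (neighbour_coords xs).map (fun k => (x + j) :: k))

-- ===== PORT B =====
-- B: results = [()]; for c in coords: results = [r + (c+d,) for r in results for d in (-1,0,1)]
def neighbour_coords_alt (coords : List Int) : List (List Int) :=
  coords.foldl
    (fun results c =>
      results.flatMap (fun r => ([-1, 0, 1] : List Int).map (fun d => r ++ [c + d])))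
    [[]]

-- ===== PRECONDITION & SPEC =====
-- Pre_ excludes only the empty list, on which A raises ValueError ('x, *xs = coords').
def Pre_neighbour_coords (coords : List Int) : Prop := coords ≠ []
instance (coords : List Int) : Decidable (Pre_neighbour_coords coords) := by
  unfold Pre_neighbour_coords; infer_instance
def pvWitness_neighbour_coords : List Int := [3, -1]

def Spec_neighbour_coords (coords : List Int) (out : List (List Int)) : Prop :=
  out = neighbour_coords_alt coords
instance (coords : List Int) (out : List (List Int)) : Decidable (Spec_neighbour_coords coords out) := by
  unfold Spec_neighbour_coords; infer_instance

-- ===== CLAIM (what is proved, stated in full; the proofs are below) =====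
def Claim_equal_neighbour_coords : Prop :=
  ∀ (coords : List Int), Dom_neighbour_coords coords → Pre_neighbour_coords coords →
    Spec_neighbour_coords coords (neighbour_coords coords)

-- ===== LEMMAS AND PROOFS =====

-- G: recursive description of the full offset product (A's order, total on []).
def pvG (coords : List Int) : List (List Int) :=
  match coords with
  | [] => [[]]
  | x :: xs => ([-1, 0, 1] : List Int).flatMap (fun j => (pvG xs).map (fun k => (x + j) :: k))

lemma foldl_eq_flatMap (xs : List Int) :
    ∀ acc : List (List Int),
      xs.foldl
        (fun results c =>
          results.flatMap (fun r => ([-1, 0, 1] : List Int).map (fun d => r ++ [c + d])))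
        acc
      = acc.flatMap (fun r => (pvG xs).map (fun t => r ++ t)) := by
  induction xs with
  | nil =>
    intro acc
    simp [pvG]
  | cons x xs ih =>
    intro acc
    simp only [List.foldl_cons, ih, pvG]
    simp [List.flatMap_assoc, List.map_map,
      Function.comp_def, List.append_assoc]

lemma alt_eq_pvG (coords : List Int) : neighbour_coords_alt coords = pvG coords := by
  unfold neighbour_coords_alt
  rw [foldl_eq_flatMap]
  simp

lemma a_eq_pvG (coords : List Int) (h : coords ≠ []) : neighbour_coords coords = pvG coords := by
  induction coords with
  | nil => exact absurd rfl h
  | cons x xs ih =>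
    cases xs with
    | nil => simp [neighbour_coords, pvG]
    | cons y ys =>
      have hA : neighbour_coords (x :: y :: ys)
          = ([-1, 0, 1] : List Int).flatMap
              (fun j => (neighbour_coords (y :: ys)).map (fun k => (x + j) :: k)) := by
        conv_lhs => rw [neighbour_coords]
        simp
      rw [hA, ih (by simp)]
      conv_rhs => rw [pvG]

-- ===== VERDICT (by name: the statement is the Claim_ definition above) =====
theorem neighbour_coords_spec : Claim_equal_neighbour_coords := by
  intro coords _ hpre
  unfold Spec_neighbour_coords
  rw [alt_eq_pvG, a_eq_pvG coords hpre]
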